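-- pv_equiv track=rewrite | github.com/linux-netdev/ml-stat | git-stat.py | get_commit_stats
-- ===== SOURCE A (Python) =====
-- def get_commit_stats(log, mailmap):
--     authors = {}
--     for line in log:
--         if not line.startswith('Author: '):
--             continue
--
--         name = line[8:]
--
--         for m in mailmap:
--             if m[0] in name:
--                 name = m[1]
--                 break
--
--         if name not in authors:
--             authors[name] = 1
--         else:
--             authors[name] += 1
--     return authors
-- ===== SOURCE B (Python) =====
-- def get_commit_stats(log, mailmap):
--     # pass 1: aggregate commit counts keyed by the raw (un-normalized) name
--     counts = {}
--     for line in log: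
--         if line.startswith('Author: '):
--             raw = line[8:]
--             counts[raw] = counts.get(raw, 0) + 1
--     # pass 2: normalize each distinct raw name via the mailmap (first match
--     # wins, fall back to the raw name) and merge the accumulated counts
--     authors = {}
--     for raw, c in counts.items():
--         name = next((m[1] for m in mailmap if m[0] in raw), raw)
--         authors[name] = authors.get(name, 0) + c
--     return authors
-- ===== Notes on version B (the rewrite author's own statement) =====
-- stated objective: alternative
-- what changed: B flips the decomposition: a first pass counts commits per raw author name, a second pass normalizes each distinct raw name through the mailmap (first substring match wins) and merges the counts, instead of A's single fused normalize-and-count loop; per-name normalization runs once per distinct name rather than once per commit.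
import Mathlib
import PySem

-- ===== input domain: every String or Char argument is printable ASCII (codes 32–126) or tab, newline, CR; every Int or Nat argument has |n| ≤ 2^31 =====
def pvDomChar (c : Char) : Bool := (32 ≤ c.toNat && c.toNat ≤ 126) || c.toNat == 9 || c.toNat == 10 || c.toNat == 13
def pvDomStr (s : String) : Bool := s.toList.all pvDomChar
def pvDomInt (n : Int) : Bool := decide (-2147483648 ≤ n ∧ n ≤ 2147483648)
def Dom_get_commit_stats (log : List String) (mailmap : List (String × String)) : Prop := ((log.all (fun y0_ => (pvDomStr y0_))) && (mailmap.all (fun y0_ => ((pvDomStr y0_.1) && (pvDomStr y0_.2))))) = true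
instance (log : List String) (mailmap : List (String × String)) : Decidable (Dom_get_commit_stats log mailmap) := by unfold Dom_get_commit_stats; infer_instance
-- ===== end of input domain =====

-- B re-decomposes A's fused normalize-and-count loop into two passes: count per raw
-- author name first, then normalize the distinct raw names and merge the counts.

-- ===== PORT A =====
-- inner 'for m in mailmap: if m[0] in name: name = m[1]; break' loop of A
def pvNormA (mailmap : List (String × String)) (name : String) : String :=
  match mailmap with
  | [] => name
  | m :: rest => if PySem.Str.isIn m.1 name then m.2 else pvNormA rest name

def get_commit_stats (log : List String) (mailmap : List (String × String)) : List (String × Int) :=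
  (log.foldl (fun (authors : PySem.Dict String Int) line =>
      if !(PySem.Str.startswith line "Author: ") then authors
      else
        let name := PySem.Str.slice line (some 8) none
        let name := pvNormA mailmap name
        if !(authors.contains name) then authors.insert name 1
        else authors.modify name 0 (· + 1))
    PySem.Dict.empty).items

-- ===== PORT B =====
-- 'next((m[1] for m in mailmap if m[0] in raw), raw)' of B
def pvNormB (mailmap : List (String × String)) (raw : String) : String :=
  match mailmap.find? (fun m => PySem.Str.isIn m.1 raw) with
  | some m => m.2
  | none => raw

def get_commit_stats_alt (log : List String) (mailmap : List (String × String)) : List (String × Int) :=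
  let counts : PySem.Dict String Int :=
    log.foldl (fun c line =>
      if PySem.Str.startswith line "Author: " then
        let raw := PySem.Str.slice line (some 8) none
        c.insert raw (c.getD raw 0 + 1)
      else c) PySem.Dict.empty
  (counts.items.foldl (fun (authors : PySem.Dict String Int) p =>
      let name := pvNormB mailmap p.1
      authors.insert name (authors.getD name 0 + p.2))
    PySem.Dict.empty).items

-- ===== PRECONDITION & SPEC =====
def Spec_get_commit_stats (log : List String) (mailmap : List (String × String)) (out : List (String × Int)) : Prop := out = get_commit_stats_alt log mailmap
instance (log : List String) (mailmap : List (String × String)) (out : List (String × Int)) : Decidable (Spec_get_commit_stats log mailmap out) := by unfold Spec_get_commit_stats; infer_instance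

-- ===== CLAIM (what is proved, stated in full; the proofs are below) =====
def Claim_equal_get_commit_stats : Prop := ∀ (log : List String) (mailmap : List (String × String)), Dom_get_commit_stats log mailmap → Spec_get_commit_stats log mailmap (get_commit_stats log mailmap)

-- ===== LEMMAS AND PROOFS =====

-- abbreviations used only by the proofs
def pvAddBy (a : PySem.Dict String Int) (n : String) (v : Int) : PySem.Dict String Int :=
  a.insert n (a.getD n 0 + v)

def pvBump (c : PySem.Dict String Int) (k : String) : PySem.Dict String Int :=
  pvAddBy c k 1

def pvStep (mm : List (String × String)) (a : PySem.Dict String Int) (p : String × Int) :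
    PySem.Dict String Int :=
  pvAddBy a (pvNormB mm p.1) p.2

def pvRemap (mm : List (String × String)) (c : PySem.Dict String Int) : PySem.Dict String Int :=
  c.items.foldl (pvStep mm) PySem.Dict.empty

def pvRawStep (c : PySem.Dict String Int) (line : String) : PySem.Dict String Int :=
  if PySem.Str.startswith line "Author: " then pvBump c (PySem.Str.slice line (some 8) none) else c

def pvAStep (mm : List (String × String)) (a : PySem.Dict String Int) (line : String) :
    PySem.Dict String Int :=
  if PySem.Str.startswith line "Author: " then pvBump a (pvNormB mm (PySem.Str.slice line (some 8) none)) else a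

theorem pvNorm_eq (mm : List (String × String)) (s : String) : pvNormA mm s = pvNormB mm s := by
  induction mm with
  | nil => rfl
  | cons m rest ih =>
      simp only [pvNormA, pvNormB, List.find?]
      by_cases h : PySem.Str.isIn m.1 s
      all_goals simp only [PySem.Str.isIn_eq] at h
      · simp [h]
      · simp only [Bool.not_eq_true] at h
        simp [h, ih, pvNormB]

theorem pv_dict_ext {d e : PySem.Dict String Int} (h : d.items = e.items) : d = e := by
  cases d; cases e; simpa using h

theorem pv_insert_insert_same (d : PySem.Dict String Int) (k : String) (x y : Int) :
    (d.insert k x).insert k y = d.insert k y := by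
  apply pv_dict_ext
  have h1 : (d.insert k x).contains k = true := PySem.Dict.contains_insert_self d k x
  by_cases hc : d.contains k = true
  · rw [PySem.Dict.items_insert_of_contains _ y h1, PySem.Dict.items_insert_of_contains _ x hc,
        PySem.Dict.items_insert_of_contains _ y hc, List.map_map]
    apply List.map_congr_left
    intro p _
    by_cases hp : p.1 = k <;> simp [hp]
  · rw [Bool.not_eq_true] at hc
    have hall : ∀ p ∈ d.items, (p.1 == k) = false := by
      simpa [PySem.Dict.contains, List.any_eq_false] using hc
    rw [PySem.Dict.items_insert_of_contains _ y h1, PySem.Dict.items_insert_of_not_contains _ x hc,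
        PySem.Dict.items_insert_of_not_contains _ y hc, List.map_append]
    congr 1
    · have : List.map (fun p => if (p.1 == k) = true then (k, y) else p) d.items
          = List.map id d.items := by
        apply List.map_congr_left
        intro p hp
        simp [hall p hp]
      simpa using this
    · simp

theorem pv_insert_comm (d : PySem.Dict String Int) (n m : String) (x y : Int)
    (hne : n ≠ m) (hn : d.contains n = true) :
    (d.insert n x).insert m y = (d.insert m y).insert n x := by
  apply pv_dict_ext
  have hmn : (m == n) = false := by simp [Ne.symm hne]
  have hnm : (n == m) = false := by simp [hne]
  have hcm : (d.insert n x).contains m = d.contains m := by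
    rw [PySem.Dict.contains_insert, hmn, Bool.false_or]
  have hcn : (d.insert m y).contains n = true := by
    rw [PySem.Dict.contains_insert, hnm, Bool.false_or]; exact hn
  by_cases hm : d.contains m = true
  · rw [PySem.Dict.items_insert_of_contains _ y (by rw [hcm]; exact hm),
        PySem.Dict.items_insert_of_contains _ x hn,
        PySem.Dict.items_insert_of_contains _ x hcn,
        PySem.Dict.items_insert_of_contains _ y hm, List.map_map, List.map_map]
    apply List.map_congr_left
    intro p _
    by_cases h1 : p.1 = n
    · simp [h1, hne]
    · by_cases h2 : p.1 = m
      · simp [h2, Ne.symm hne]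
      · simp [h1, h2]
  · rw [Bool.not_eq_true] at hm
    rw [PySem.Dict.items_insert_of_not_contains _ y (by rw [hcm]; exact hm),
        PySem.Dict.items_insert_of_contains _ x hn,
        PySem.Dict.items_insert_of_contains _ x hcn,
        PySem.Dict.items_insert_of_not_contains _ y hm, List.map_append]
    simp [Ne.symm hne]

theorem pv_bump_addBy (a : PySem.Dict String Int) (n : String) (v : Int) :
    pvBump (pvAddBy a n v) n = pvAddBy a n (v + 1) := by
  simp only [pvBump, pvAddBy, PySem.Dict.getD_insert_self, pv_insert_insert_same]
  ring_nf

theorem pv_step_bump_comm (mm : List (String × String)) (a : PySem.Dict String Int)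
    (n : String) (p : String × Int) (hn : a.contains n = true) :
    pvStep mm (pvBump a n) p = pvBump (pvStep mm a p) n := by
  simp only [pvStep, pvBump, pvAddBy]
  by_cases hm : pvNormB mm p.1 = n
  · rw [hm, PySem.Dict.getD_insert_self, PySem.Dict.getD_insert_self,
        pv_insert_insert_same, pv_insert_insert_same]
    ring_nf
  · rw [PySem.Dict.getD_insert_of_ne _ _ _ hm, PySem.Dict.getD_insert_of_ne _ _ _ (Ne.symm hm),
        pv_insert_comm a n (pvNormB mm p.1) _ _ (Ne.symm hm) hn]

theorem pv_contains_addBy (a : PySem.Dict String Int) (n m : String) (v : Int)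
    (hn : a.contains n = true) : (pvAddBy a m v).contains n = true := by
  simp [pvAddBy, PySem.Dict.contains_insert, hn]

theorem pv_foldl_bump_comm (mm : List (String × String)) (l : List (String × Int))
    (a : PySem.Dict String Int) (n : String) (hn : a.contains n = true) :
    l.foldl (pvStep mm) (pvBump a n) = pvBump (l.foldl (pvStep mm) a) n := by
  induction l generalizing a with
  | nil => rfl
  | cons p t ih =>
      simp only [List.foldl_cons]
      rw [pv_step_bump_comm mm a n p hn]
      exact ih (pvStep mm a p) (pv_contains_addBy a n _ _ hn)

theorem pv_bump_items_cons_ne (k raw : String) (w : Int) (t : List (String × Int))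
    (h : (k == raw) = false) :
    (pvBump ⟨(k, w) :: t⟩ raw).items = (k, w) :: (pvBump ⟨t⟩ raw).items := by
  have hcc : (⟨(k, w) :: t⟩ : PySem.Dict String Int).contains raw
      = (⟨t⟩ : PySem.Dict String Int).contains raw := by
    simp [PySem.Dict.contains, h]
  have hgd : (⟨(k, w) :: t⟩ : PySem.Dict String Int).getD raw 0
      = (⟨t⟩ : PySem.Dict String Int).getD raw 0 := by
    simp [PySem.Dict.getD, PySem.Dict.get?, List.find?, h]
  simp only [pvBump, pvAddBy, PySem.Dict.insert, hcc, hgd]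
  have hk : ¬ k = raw := by simpa using h
  by_cases hc : (⟨t⟩ : PySem.Dict String Int).contains raw = true
  · simp [hc, hk]
  · rw [Bool.not_eq_true] at hc
    simp [hc]

theorem pv_bump_items_cons_self (raw : String) (w : Int) (t : List (String × Int))
    (hn : raw ∉ t.map Prod.fst) :
    (pvBump ⟨(raw, w) :: t⟩ raw).items = (raw, w + 1) :: t := by
  have hcc : (⟨(raw, w) :: t⟩ : PySem.Dict String Int).contains raw = true := by
    simp [PySem.Dict.contains]
  have hgd : (⟨(raw, w) :: t⟩ : PySem.Dict String Int).getD raw 0 = w := by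
    simp [PySem.Dict.getD, PySem.Dict.get?, List.find?]
  rw [pvBump, pvAddBy, hgd, PySem.Dict.items_insert_of_contains _ _ hcc]
  have hmap : List.map (fun p => if (p.1 == raw) = true then (raw, w + 1) else p) t
      = List.map id t := by
    apply List.map_congr_left
    intro p hp
    have : ¬ p.1 = raw := fun he => hn (he ▸ List.mem_map_of_mem hp)
    simp [this]
  simp only [List.map_cons]
  rw [hmap]
  simp

theorem pv_K (mm : List (String × String)) (l : List (String × Int)) (raw : String)
    (hnd : (l.map Prod.fst).Nodup) (e : PySem.Dict String Int) :
    (pvBump ⟨l⟩ raw).items.foldl (pvStep mm) e =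
      pvBump (l.foldl (pvStep mm) e) (pvNormB mm raw) := by
  induction l generalizing e with
  | nil =>
      simp only [pvBump, pvAddBy]
      rfl
  | cons p t ih =>
      obtain ⟨k, w⟩ := p
      rw [List.map_cons, List.nodup_cons] at hnd
      by_cases hk : k = raw
      · subst hk
        have hn : k ∉ t.map Prod.fst := hnd.1
        rw [pv_bump_items_cons_self k w t hn]
        simp only [List.foldl_cons]
        have : pvStep mm e (k, w + 1) = pvBump (pvStep mm e (k, w)) (pvNormB mm k) := by
          simp only [pvStep]
          rw [pv_bump_addBy]
        rw [this]
        exact pv_foldl_bump_comm mm t _ _ (by simp [pvStep, pvAddBy, PySem.Dict.contains_insert_self])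
      · rw [pv_bump_items_cons_ne k raw w t (by simp [hk])]
        simp only [List.foldl_cons]
        exact ih hnd.2 _

theorem pv_nodup_bump (c : PySem.Dict String Int) (raw : String)
    (h : c.keys.Nodup) : (pvBump c raw).keys.Nodup :=
  PySem.Dict.nodup_keys_insert _ _ _ h

theorem pv_main (mm : List (String × String)) (log : List String)
    (c : PySem.Dict String Int) (h : c.keys.Nodup) :
    pvRemap mm (log.foldl pvRawStep c) = log.foldl (pvAStep mm) (pvRemap mm c) := by
  induction log generalizing c with
  | nil => rfl
  | cons line t ih =>
      simp only [List.foldl_cons, pvRawStep, pvAStep]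
      by_cases hs : PySem.Str.startswith line "Author: " = true
      · simp only [hs, if_pos]
        rw [ih _ (pv_nodup_bump c _ h)]
        congr 1
        have := pv_K mm c.items (PySem.Str.slice line (some 8) none) (by simpa [PySem.Dict.keys] using h) PySem.Dict.empty
        cases c
        exact this
      · simp only [hs, Bool.false_eq_true, if_false]
        exact ih c h

theorem pv_AStep_eq (mm : List (String × String)) :
    (fun (authors : PySem.Dict String Int) line =>
      if !(PySem.Str.startswith line "Author: ") then authors
      else
        let name := PySem.Str.slice line (some 8) none
        let name := pvNormA mm name
        if !(authors.contains name) then authors.insert name 1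
        else authors.modify name 0 (· + 1)) = pvAStep mm := by
  funext a line
  simp only [pvAStep, pvNorm_eq]
  by_cases hs : PySem.Str.startswith line "Author: " = true
  · simp only [hs, Bool.not_true, Bool.false_eq_true, if_false, if_true]
    set n := pvNormB mm (PySem.Str.slice line (some 8) none) with hn
    by_cases hc : a.contains n = true
    · simp [hc, PySem.Dict.modify, pvBump, pvAddBy]
    · simp only [Bool.not_eq_true] at hc
      simp [hc, pvBump, pvAddBy, PySem.Dict.getD_of_not_contains a 0 hc]
  · simp at hs
    simp [hs]

-- ===== VERDICT (by name: the statement is the Claim_ definition above) =====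
theorem get_commit_stats_spec : Claim_equal_get_commit_stats := by
  intro log mm _
  show get_commit_stats log mm = get_commit_stats_alt log mm
  unfold get_commit_stats get_commit_stats_alt
  rw [pv_AStep_eq]
  show (List.foldl (pvAStep mm) PySem.Dict.empty log).items =
    (pvRemap mm (List.foldl pvRawStep PySem.Dict.empty log)).items
  have h0 : (PySem.Dict.empty : PySem.Dict String Int).keys.Nodup := by
    simp [PySem.Dict.keys, PySem.Dict.empty]
  rw [pv_main mm log PySem.Dict.empty h0]
  rfl
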